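-- pv_equiv track=rewrite | github.com/drdubel/cwiczenia | pozostałe/lIczby.py | ile
-- ===== SOURCE A (Python) =====
-- def ile(lista):
--     wynik = 0
--     for liczba in lista:
--         if liczba > 1000000:
--             raise ValueError("value too high, it has to be less than 1000000")
--         if liczba < 0:
--             raise ValueError("value has to be positive")
--         a = str(liczba)
--         suma = 0
--         iloczyn = 1
--         for cyfra in a:
--             suma += int(cyfra)
--             iloczyn = int(cyfra) * iloczyn
--         if suma == iloczyn:
--             wynik += 1
--     return wynik
-- ===== SOURCE B (Python) =====
-- def ile(lista):
--     wynik = 0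
--     for liczba in lista:
--         if liczba > 1000000:
--             raise ValueError("value too high, it has to be less than 1000000")
--         if liczba < 0:
--             raise ValueError("value has to be positive")
--         suma = 0
--         iloczyn = 1
--         n = liczba
--         while True:
--             n, d = divmod(n, 10)
--             suma += d
--             iloczyn *= d
--             if n == 0:
--                 break
--         if suma == iloczyn:
--             wynik += 1
--     return wynik
-- ===== Notes on version B (the rewrite author's own statement) =====
-- stated objective: idiomatic
-- what changed: The per-number digit traversal over str(liczba) is replaced by a do-while arithmetic extraction with divmod(n, 10), accumulating the digit sum and product without any string conversion; the outer loop and the two validation raises are unchanged.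
import Mathlib
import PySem

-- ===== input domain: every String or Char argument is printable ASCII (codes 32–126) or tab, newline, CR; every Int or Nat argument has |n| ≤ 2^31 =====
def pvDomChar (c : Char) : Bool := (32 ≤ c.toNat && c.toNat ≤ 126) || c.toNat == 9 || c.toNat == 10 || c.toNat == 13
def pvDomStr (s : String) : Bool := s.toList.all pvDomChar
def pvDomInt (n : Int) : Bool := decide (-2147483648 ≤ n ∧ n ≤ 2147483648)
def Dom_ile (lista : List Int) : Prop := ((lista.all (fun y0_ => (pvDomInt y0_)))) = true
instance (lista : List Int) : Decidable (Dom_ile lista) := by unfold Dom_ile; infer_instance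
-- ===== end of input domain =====

-- B replaces A's decimal-string digit traversal by arithmetic divmod extraction (idiomatic,
-- no string conversion); same validation raises, same count returned.

-- ===== PORT A =====
-- int(cyfra) is ported by hand as 'c.toNat - 48': exact for the decimal digit characters
-- produced by str(liczba) with liczba ≥ 0, the only characters this loop ever sees.
def ile (lista : List Int) : Int :=
  lista.foldl
    (fun wynik liczba =>
      if liczba > 1000000 then wynik       -- raise ValueError: unreachable under Pre_ile
      else if liczba < 0 then wynik        -- raise ValueError: unreachable under Pre_ile
      else
        let a := PySem.Int.toStr liczba
        let sp := a.toList.foldl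
          (fun (sp : Int × Int) cyfra =>
            (sp.1 + ((cyfra.toNat : Int) - 48), ((cyfra.toNat : Int) - 48) * sp.2))
          (0, 1)
        if sp.1 = sp.2 then wynik + 1 else wynik)
    0

-- ===== PORT B =====
-- The do-while 'n, d = divmod(n, 10); …; if n == 0: break' of Source B; the guard 'liczba < 0'
-- has already fired, so n ≥ 0 throughout and divmod(n, 10) is exactly Nat division/modulus.
def ileDigits (n : Nat) (suma iloczyn : Int) : Int × Int :=
  let d := n % 10
  let q := n / 10
  let suma := suma + (d : Int)
  let iloczyn := iloczyn * (d : Int)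
  if q = 0 then (suma, iloczyn) else ileDigits q suma iloczyn
termination_by n
decreasing_by exact Nat.div_lt_self (by omega) (by omega)

def ile_alt (lista : List Int) : Int :=
  lista.foldl
    (fun wynik liczba =>
      if liczba > 1000000 then wynik       -- raise ValueError: unreachable under Pre_ile
      else if liczba < 0 then wynik        -- raise ValueError: unreachable under Pre_ile
      else
        let sp := ileDigits liczba.toNat 0 1
        if sp.1 = sp.2 then wynik + 1 else wynik)
    0

-- ===== PRECONDITION & SPEC =====
-- Pre_ile excludes exactly the inputs on which A raises ValueError: some element > 1000000 or < 0.
def Pre_ile (lista : List Int) : Prop :=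
  ∀ liczba ∈ lista, 0 ≤ liczba ∧ liczba ≤ 1000000

instance (lista : List Int) : Decidable (Pre_ile lista) := by unfold Pre_ile; infer_instance

def pvWitness_ile : List Int := [123, 0, 10, 22, 1000000]

def Spec_ile (lista : List Int) (out : Int) : Prop := out = ile_alt lista
instance (lista : List Int) (out : Int) : Decidable (Spec_ile lista out) := by unfold Spec_ile; infer_instance

-- ===== CLAIM (what is proved, stated in full; the proofs are below) =====
def Claim_equal_ile : Prop := ∀ (lista : List Int), Dom_ile lista → Pre_ile lista → Spec_ile lista (ile lista)

-- ===== LEMMAS AND PROOFS =====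

-- digit-character value used by port A
def pvValc (c : Char) : Int := (c.toNat : Int) - 48

theorem pvValc_digitChar (d : Nat) (h : d < 10) : pvValc (Nat.digitChar d) = (d : Int) := by
  interval_cases d <;> decide

-- closed form of A's inner fold
theorem pvFoldA (cs : List Char) (s p : Int) :
    cs.foldl (fun (sp : Int × Int) cyfra =>
        (sp.1 + ((cyfra.toNat : Int) - 48), ((cyfra.toNat : Int) - 48) * sp.2)) (s, p)
      = (s + (cs.map pvValc).sum, (cs.map pvValc).prod * p) := by
  induction cs generalizing s p with
  | nil => simp
  | cons c cs ih =>
    simp only [List.foldl_cons, List.map_cons, List.sum_cons, List.prod_cons, ih, pvValc]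
    rw [Prod.mk.injEq]
    exact ⟨by ring, by ring⟩

-- core's fuel recursion produces the reversed Mathlib digit list (for 0 < n < f)
theorem pvToDigitsCore_eq (f : Nat) : ∀ (n : Nat) (acc : List Char), 0 < n → n < f →
    Nat.toDigitsCore 10 f n acc = ((Nat.digits 10 n).map Nat.digitChar).reverse ++ acc := by
  induction f with
  | zero => intro n acc h1 h2; omega
  | succ f ih =>
    intro n acc h1 h2
    rw [Nat.toDigitsCore]
    by_cases hq : n / 10 = 0
    · simp only [hq, if_true]
      rw [Nat.digits_def' (by norm_num) h1, hq, Nat.digits_zero]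
      simp
    · simp only [hq, if_false]
      rw [ih (n / 10) _ (Nat.pos_of_ne_zero hq) (by
        have := Nat.div_lt_self h1 (by norm_num : 1 < 10); omega)]
      rw [Nat.digits_def' (by norm_num) h1]
      simp

-- closed form of B's do-while
theorem pvIleDigits_eq (n : Nat) : ∀ (s p : Int),
    ileDigits n s p =
      if n = 0 then (s, 0)
      else (s + ((Nat.digits 10 n).map (Nat.cast : Nat → Int)).sum,
            p * ((Nat.digits 10 n).map (Nat.cast : Nat → Int)).prod) := by
  induction n using Nat.strong_induction_on with
  | _ n ih =>
    intro s p
    rw [ileDigits]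
    by_cases h0 : n = 0
    · subst h0; simp
    · by_cases hq : n / 10 = 0
      · simp only [hq, if_true, h0, if_false]
        have hn : n < 10 := by omega
        rw [Nat.digits_def' (by norm_num) (Nat.pos_of_ne_zero h0), hq, Nat.digits_zero]
        simp
      · simp only [hq, if_false, h0]
        rw [ih (n / 10) (Nat.div_lt_self (Nat.pos_of_ne_zero h0) (by norm_num)), if_neg hq]
        rw [Nat.digits_def' (by norm_num) (Nat.pos_of_ne_zero h0)]
        simp only [List.map_cons, List.sum_cons, List.prod_cons]
        rw [Prod.mk.injEq]
        exact ⟨by ring, by ring⟩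

-- the two per-element digit computations agree for every m : Nat
theorem pvInner_eq (m : Nat) :
    (Nat.toDigits 10 m).foldl
        (fun (sp : Int × Int) cyfra =>
          (sp.1 + ((cyfra.toNat : Int) - 48), ((cyfra.toNat : Int) - 48) * sp.2)) (0, 1)
      = ileDigits m 0 1 := by
  rw [pvFoldA, pvIleDigits_eq]
  by_cases h0 : m = 0
  · subst h0; decide
  · rw [if_neg h0]
    unfold Nat.toDigits
    rw [pvToDigitsCore_eq (m + 1) m [] (Nat.pos_of_ne_zero h0) (by omega)]
    have hmap : (((Nat.digits 10 m).map Nat.digitChar).map pvValc)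
        = (Nat.digits 10 m).map (Nat.cast : Nat → Int) := by
      rw [List.map_map]
      exact List.map_congr_left
        (fun d hd => pvValc_digitChar d (Nat.digits_lt_base (by norm_num) hd))
    rw [List.append_nil, List.map_reverse, List.sum_reverse, List.prod_reverse, hmap]
    simp [mul_comm]

theorem pvSteps_eq :
    (fun (wynik liczba : Int) =>
      if liczba > 1000000 then wynik
      else if liczba < 0 then wynik
      else
        let a := PySem.Int.toStr liczba
        let sp := a.toList.foldl
          (fun (sp : Int × Int) cyfra =>
            (sp.1 + ((cyfra.toNat : Int) - 48), ((cyfra.toNat : Int) - 48) * sp.2))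
          (0, 1)
        if sp.1 = sp.2 then wynik + 1 else wynik)
    = (fun (wynik liczba : Int) =>
      if liczba > 1000000 then wynik
      else if liczba < 0 then wynik
      else
        let sp := ileDigits liczba.toNat 0 1
        if sp.1 = sp.2 then wynik + 1 else wynik) := by
  funext wynik liczba
  by_cases h1 : liczba > 1000000
  · simp [h1]
  · by_cases h2 : liczba < 0
    · simp [h1, h2]
    · simp only [h1, h2, if_false]
      have hchars : (PySem.Int.toStr liczba).toList = Nat.toDigits 10 liczba.toNat := by
        rw [PySem.Int.toList_toStr, PySem.Int.toChars, if_neg (by omega)]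
      rw [hchars, pvInner_eq]

-- ===== VERDICT (by name: the statement is the Claim_ definition above) =====
theorem ile_spec : Claim_equal_ile := by
  intro lista _ _
  unfold Spec_ile ile ile_alt
  rw [pvSteps_eq]
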